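-- pv_equiv track=rewrite | github.com/grapheneaffiliate/h4-polytopic-attention | solve_arc1_recovery.py | solve_178fcbfb
-- ===== SOURCE A (Python) =====
-- def solve_178fcbfb(grid):
--     """1->fill row, 2->fill col, 3->fill row. Draw order: 2 first, then 3, then 1."""
--     rows, cols = len(grid), len(grid[0])
--     out = [[0]*cols for _ in range(rows)]
--     positions = {1: [], 2: [], 3: []}
--     for r in range(rows):
--         for c in range(cols):
--             v = grid[r][c]
--             if v in positions:
--                 positions[v].append((r, c))
--     # Draw in order: 2 (vertical), then 3 (horizontal), then 1 (horizontal)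
--     for r, c in positions[2]:
--         for rr in range(rows):
--             out[rr][c] = 2
--     for r, c in positions[3]:
--         for cc in range(cols):
--             out[r][cc] = 3
--     for r, c in positions[1]:
--         for cc in range(cols):
--             out[r][cc] = 1
--     return out
-- ===== SOURCE B (Python) =====
-- def solve_178fcbfb(grid):
--     """One scan builds row/column marker flags; output is then built row by row
--     (precedence 1 > 3 > 2, mirroring A's draw order 2, then 3, then 1)."""
--     cols = len(grid[0])
--     row1 = []
--     row3 = []
--     col2 = [False] * cols
--     for row in grid:
--         has1 = False
--         has3 = False
--         for c in range(cols):
--             v = row[c]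
--             if v == 1:
--                 has1 = True
--             elif v == 3:
--                 has3 = True
--             elif v == 2:
--                 col2[c] = True
--         row1.append(has1)
--         row3.append(has3)
--     out = []
--     for r in range(len(grid)):
--         if row1[r]:
--             out.append([1] * cols)
--         elif row3[r]:
--             out.append([3] * cols)
--         else:
--             out.append([2 if col2[c] else 0 for c in range(cols)])
--     return out
-- ===== Notes on version B (the rewrite author's own statement) =====
-- stated objective: simpler
-- what changed: Instead of collecting marker positions and painting whole rows/columns with nested overwrite loops, B does one scan building boolean flags row1[r]/row3[r]/col2[c] and then emits each output row directly from the flags with precedence 1 > 3 > 2.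
import Mathlib
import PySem

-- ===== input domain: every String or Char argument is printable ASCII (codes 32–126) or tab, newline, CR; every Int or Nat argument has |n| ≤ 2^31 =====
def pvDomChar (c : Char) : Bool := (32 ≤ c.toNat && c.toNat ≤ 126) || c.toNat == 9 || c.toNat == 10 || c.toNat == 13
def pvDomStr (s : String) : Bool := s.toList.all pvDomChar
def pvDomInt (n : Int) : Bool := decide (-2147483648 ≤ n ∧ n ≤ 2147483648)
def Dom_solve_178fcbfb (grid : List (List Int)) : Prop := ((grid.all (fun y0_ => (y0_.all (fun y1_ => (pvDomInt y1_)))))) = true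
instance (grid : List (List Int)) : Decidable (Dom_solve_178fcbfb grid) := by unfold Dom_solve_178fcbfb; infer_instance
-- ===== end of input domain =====

-- B replaces A's position-collection and row/column painting loops by one scan that
-- builds row/column marker flags and then emits each output row directly (objective: simpler).

-- ===== PORT A =====
-- out[r][c] = v  (list-of-lists cell assignment; no-op when out of range, which Pre_ rules out)
def pvSet2 (out : List (List Int)) (r c : Nat) (v : Int) : List (List Int) :=
  out.set r ((out.getD r []).set c v)

-- literal port of A; grid[0] / grid[r][c] are in range under Pre_ (Python raises IndexError otherwise)
def solve_178fcbfb (grid : List (List Int)) : List (List Int) :=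
  let rows := grid.length
  let cols := (grid.getD 0 []).length
  let out0 := (List.range rows).map (fun _ => List.replicate cols (0 : Int))
  let ps := (List.range rows).foldl (fun ps r =>
      (List.range cols).foldl (fun ps c =>
        let v := (grid.getD r []).getD c 0
        if v = 1 then (ps.1 ++ [(r, c)], ps.2.1, ps.2.2)
        else if v = 2 then (ps.1, ps.2.1 ++ [(r, c)], ps.2.2)
        else if v = 3 then (ps.1, ps.2.1, ps.2.2 ++ [(r, c)])
        else ps) ps)
    (([], [], []) : List (Nat × Nat) × List (Nat × Nat) × List (Nat × Nat))
  let out1 := ps.2.1.foldl (fun o rc => (List.range rows).foldl (fun o rr => pvSet2 o rr rc.2 2) o) out0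
  let out2 := ps.2.2.foldl (fun o rc => (List.range cols).foldl (fun o cc => pvSet2 o rc.1 cc 3) o) out1
  ps.1.foldl (fun o rc => (List.range cols).foldl (fun o cc => pvSet2 o rc.1 cc 1) o) out2

-- ===== PORT B =====
-- literal port of Source B: one scan building (row1, row3, col2) flags, then build the output
def solve_178fcbfb_alt (grid : List (List Int)) : List (List Int) :=
  let cols := (grid.getD 0 []).length
  let st := grid.foldl (fun st row =>
      let t := (List.range cols).foldl (fun t c =>
          let v := row.getD c 0
          if v = 1 then (true, t.2.1, t.2.2)
          else if v = 3 then (t.1, true, t.2.2)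
          else if v = 2 then (t.1, t.2.1, t.2.2.set c true)
          else t)
        ((false, false, st.2.2) : Bool × Bool × List Bool)
      (st.1 ++ [t.1], st.2.1 ++ [t.2.1], t.2.2))
    (([], [], List.replicate cols false) : List Bool × List Bool × List Bool)
  (List.range grid.length).map (fun r =>
    if st.1.getD r false then List.replicate cols (1 : Int)
    else if st.2.1.getD r false then List.replicate cols (3 : Int)
    else (List.range cols).map (fun c => if st.2.2.getD c false then (2 : Int) else 0))

-- ===== PRECONDITION & SPEC =====
-- Pre_ excludes exactly the inputs where Python A raises IndexError: the empty grid
-- (grid[0]) and grids with a row shorter than the first row (grid[r][c]).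
def Pre_solve_178fcbfb (grid : List (List Int)) : Prop :=
  grid ≠ [] ∧ ∀ row ∈ grid, (grid.headD []).length ≤ row.length
instance (grid : List (List Int)) : Decidable (Pre_solve_178fcbfb grid) := by
  unfold Pre_solve_178fcbfb; infer_instance

def pvWitness_solve_178fcbfb : List (List Int) := [[1, 0, 0], [0, 2, 0], [0, 0, 3]]

def Spec_solve_178fcbfb (grid : List (List Int)) (out : List (List Int)) : Prop := out = solve_178fcbfb_alt grid
instance (grid : List (List Int)) (out : List (List Int)) : Decidable (Spec_solve_178fcbfb grid out) := by unfold Spec_solve_178fcbfb; infer_instance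

-- ===== CLAIM (what is proved, stated in full; the proofs are below) =====
def Claim_equal_solve_178fcbfb : Prop := ∀ (grid : List (List Int)), Dom_solve_178fcbfb grid → Pre_solve_178fcbfb grid → Spec_solve_178fcbfb grid (solve_178fcbfb grid)

-- ===== LEMMAS AND PROOFS =====

-- common pointwise specification both ports are proved equal to
def pvHas (row : List Int) (n : Nat) (v : Int) : Bool :=
  (List.range n).any (fun c => row.getD c 0 == v)

def pvCol2 (grid : List (List Int)) (c : Nat) : Bool :=
  grid.any (fun row => row.getD c 0 == 2)

def pvSpecGrid (grid : List (List Int)) : List (List Int) :=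
  (List.range grid.length).map (fun r =>
    if pvHas (grid.getD r []) (grid.getD 0 []).length 1 then List.replicate (grid.getD 0 []).length (1 : Int)
    else if pvHas (grid.getD r []) (grid.getD 0 []).length 3 then List.replicate (grid.getD 0 []).length (3 : Int)
    else (List.range (grid.getD 0 []).length).map (fun c => if pvCol2 grid c then (2 : Int) else 0))

theorem pvHas_succ (row : List Int) (n : Nat) (v : Int) :
    pvHas row (n + 1) v = (pvHas row n v || (row[n]?.getD 0 == v)) := by
  simp [pvHas, List.range_succ]

-- ---------- B-side ----------
def pvBInner (row : List Int) (n : Nat) (t : Bool × Bool × List Bool) : Bool × Bool × List Bool :=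
  (List.range n).foldl (fun t c =>
      let v := row.getD c 0
      if v = 1 then (true, t.2.1, t.2.2)
      else if v = 3 then (t.1, true, t.2.2)
      else if v = 2 then (t.1, t.2.1, t.2.2.set c true)
      else t) t

theorem pvBInner_succ (row : List Int) (n : Nat) (t : Bool × Bool × List Bool) :
    pvBInner row (n + 1) t =
      (if row[n]?.getD 0 = 1 then (true, (pvBInner row n t).2.1, (pvBInner row n t).2.2)
       else if row[n]?.getD 0 = 3 then ((pvBInner row n t).1, true, (pvBInner row n t).2.2)
       else if row[n]?.getD 0 = 2 then ((pvBInner row n t).1, (pvBInner row n t).2.1, (pvBInner row n t).2.2.set n true)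
       else pvBInner row n t) := by
  simp [pvBInner, List.range_succ]

theorem pvBInner_fst (row : List Int) (n : Nat) (b1 b3 : Bool) (acc : List Bool) :
    (pvBInner row n (b1, b3, acc)).1 = (b1 || pvHas row n 1) := by
  induction n with
  | zero => simp [pvBInner, pvHas]
  | succ n ih =>
    rw [pvBInner_succ, pvHas_succ]
    split_ifs with h1 h3 h2
    · have hx : (row[n]?.getD 0 == (1:Int)) = true := by simp [h1]
      simp [hx]
    · have hx : (row[n]?.getD 0 == (1:Int)) = false := by simp [h1]
      simp [hx, ih]
    · have hx : (row[n]?.getD 0 == (1:Int)) = false := by simp [h1]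
      simp [hx, ih]
    · have hx : (row[n]?.getD 0 == (1:Int)) = false := by simp [h1]
      simp [hx, ih]

theorem pvBInner_snd (row : List Int) (n : Nat) (b1 b3 : Bool) (acc : List Bool) :
    (pvBInner row n (b1, b3, acc)).2.1 = (b3 || pvHas row n 3) := by
  induction n with
  | zero => simp [pvBInner, pvHas]
  | succ n ih =>
    rw [pvBInner_succ, pvHas_succ]
    split_ifs with h1 h3 h2
    · have hx : (row[n]?.getD 0 == (3:Int)) = false := by simp [h1]
      simp [hx, ih]
    · have hx : (row[n]?.getD 0 == (3:Int)) = true := by simp [h3]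
      simp [hx]
    · have hx : (row[n]?.getD 0 == (3:Int)) = false := by simp [h2]
      simp [hx, ih]
    · have hx : (row[n]?.getD 0 == (3:Int)) = false := by simp [h3]
      simp [hx, ih]

theorem pvBInner_len (row : List Int) (n : Nat) (b1 b3 : Bool) (acc : List Bool) :
    (pvBInner row n (b1, b3, acc)).2.2.length = acc.length := by
  induction n with
  | zero => simp [pvBInner]
  | succ n ih =>
    rw [pvBInner_succ]
    split_ifs <;> simp [ih]

theorem pvBInner_col (row : List Int) (n : Nat) (b1 b3 : Bool) (acc : List Bool) (c : Nat) :
    (pvBInner row n (b1, b3, acc)).2.2[c]? =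
      acc[c]?.map (fun b => b || (decide (c < n) && (row[c]?.getD 0 == 2))) := by
  induction n with
  | zero =>
    simp [pvBInner]
    try (cases acc[c]? <;> simp)
  | succ n ih =>
    rw [pvBInner_succ]
    by_cases hc : c = n
    · subst hc
      split_ifs with h1 h3 h2
      · rw [ih]
        have : (row[c]?.getD 0 == (2:Int)) = false := by simp [h1]
        simp [this]
      · rw [ih]
        have : (row[c]?.getD 0 == (2:Int)) = false := by simp [h3]
        simp [this]
      · rw [List.getElem?_set, if_pos rfl, pvBInner_len row c b1 b3 acc]
        have hb : (row[c]?.getD 0 == (2:Int)) = true := by simp [h2]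
        cases hac : acc[c]? with
        | none =>
          have hlen : acc.length ≤ c := List.getElem?_eq_none_iff.mp hac
          simp [Nat.not_lt.mpr hlen]
        | some b =>
          have hlen : c < acc.length := by
            have := List.getElem?_eq_some_iff.mp hac
            exact this.1
          simp [hlen, hb]
      · rw [ih]
        have : (row[c]?.getD 0 == (2:Int)) = false := by simp [h2]
        simp [this]
    · have hlt : decide (c < n + 1) = decide (c < n) := by
        have : (c < n + 1) ↔ (c < n) := by omega
        simp [this]
      split_ifs with h1 h3 h2
      · rw [ih, hlt]
      · rw [ih, hlt]
      · rw [List.getElem?_set, if_neg (by omega : ¬ n = c), ih, hlt]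
      · rw [ih, hlt]

def pvBOuter (n : Nat) (gs : List (List Int)) (st : List Bool × List Bool × List Bool) :
    List Bool × List Bool × List Bool :=
  gs.foldl (fun st row =>
      let t := pvBInner row n (false, false, st.2.2)
      (st.1 ++ [t.1], st.2.1 ++ [t.2.1], t.2.2)) st

theorem pvBOuter_fst (n : Nat) (gs : List (List Int)) :
    ∀ (l1 l3 : List Bool) (acc : List Bool),
      (pvBOuter n gs (l1, l3, acc)).1 = l1 ++ gs.map (fun row => pvHas row n 1) := by
  induction gs with
  | nil => intro l1 l3 acc; simp [pvBOuter]
  | cons row rest ih =>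
    intro l1 l3 acc
    show (pvBOuter n rest _).1 = _
    rw [ih]
    simp [pvBInner_fst]

theorem pvBOuter_snd (n : Nat) (gs : List (List Int)) :
    ∀ (l1 l3 : List Bool) (acc : List Bool),
      (pvBOuter n gs (l1, l3, acc)).2.1 = l3 ++ gs.map (fun row => pvHas row n 3) := by
  induction gs with
  | nil => intro l1 l3 acc; simp [pvBOuter]
  | cons row rest ih =>
    intro l1 l3 acc
    show (pvBOuter n rest _).2.1 = _
    rw [ih]
    simp [pvBInner_snd]

theorem pvBOuter_col (n : Nat) (gs : List (List Int)) :
    ∀ (l1 l3 : List Bool) (acc : List Bool) (c : Nat),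
      (pvBOuter n gs (l1, l3, acc)).2.2[c]? =
        acc[c]?.map (fun b => b || (decide (c < n) && gs.any (fun row => row[c]?.getD 0 == 2))) := by
  induction gs with
  | nil =>
    intro l1 l3 acc c
    simp [pvBOuter]
    try (cases acc[c]? <;> simp)
  | cons row rest ih =>
    intro l1 l3 acc c
    show (pvBOuter n rest _).2.2[c]? = _
    rw [ih, pvBInner_col, Option.map_map]
    cases hac : acc[c]? with
    | none => simp
    | some b =>
      simp only [Option.map_some, Function.comp, List.any_cons]
      congr 1
      simp [Bool.and_or_distrib_left, Bool.or_assoc]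

theorem B_eq_pvSpecGrid (grid : List (List Int)) :
    solve_178fcbfb_alt grid = pvSpecGrid grid := by
  have hrestate : solve_178fcbfb_alt grid =
      (List.range grid.length).map (fun r =>
        if (pvBOuter (grid.getD 0 []).length grid ([], [], List.replicate (grid.getD 0 []).length false)).1.getD r false then
          List.replicate (grid.getD 0 []).length (1 : Int)
        else if (pvBOuter (grid.getD 0 []).length grid ([], [], List.replicate (grid.getD 0 []).length false)).2.1.getD r false then
          List.replicate (grid.getD 0 []).length (3 : Int)
        else (List.range (grid.getD 0 []).length).map (fun c =>
          if (pvBOuter (grid.getD 0 []).length grid ([], [], List.replicate (grid.getD 0 []).length false)).2.2.getD c false then (2 : Int) else 0)) := rfl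
  rw [hrestate, pvSpecGrid]
  apply List.map_congr_left
  intro r hr
  rw [List.mem_range] at hr
  have h1 : (pvBOuter (grid.getD 0 []).length grid ([], [], List.replicate (grid.getD 0 []).length false)).1.getD r false
      = pvHas (grid.getD r []) (grid.getD 0 []).length 1 := by
    rw [pvBOuter_fst]
    simp [List.getD_eq_getElem?_getD, List.getElem?_map, List.getElem?_eq_getElem hr]
  have h3 : (pvBOuter (grid.getD 0 []).length grid ([], [], List.replicate (grid.getD 0 []).length false)).2.1.getD r false
      = pvHas (grid.getD r []) (grid.getD 0 []).length 3 := by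
    rw [pvBOuter_snd]
    simp [List.getD_eq_getElem?_getD, List.getElem?_map, List.getElem?_eq_getElem hr]
  rw [h1, h3]
  congr 1
  congr 1
  apply List.map_congr_left
  intro c hc
  rw [List.mem_range] at hc
  have h2 : (pvBOuter (grid.getD 0 []).length grid ([], [], List.replicate (grid.getD 0 []).length false)).2.2.getD c false
      = pvCol2 grid c := by
    rw [List.getD_eq_getElem?_getD, pvBOuter_col, List.getElem?_replicate, if_pos hc,
      Option.map_some, Option.getD_some, Bool.false_or, decide_eq_true hc, Bool.true_and]
    simp [pvCol2]
  rw [h2]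

-- ---------- A-side ----------
def pvVal (grid : List (List Int)) (rc : Nat × Nat) : Int := (grid.getD rc.1 []).getD rc.2 0

def pvCells (rows n : Nat) : List (Nat × Nat) :=
  (List.range rows).flatMap (fun r => (List.range n).map (fun c => (r, c)))

def pvCellStep (grid : List (List Int))
    (ps : List (Nat × Nat) × List (Nat × Nat) × List (Nat × Nat)) (rc : Nat × Nat) :
    List (Nat × Nat) × List (Nat × Nat) × List (Nat × Nat) :=
  let v := pvVal grid rc
  if v = 1 then (ps.1 ++ [rc], ps.2.1, ps.2.2)
  else if v = 2 then (ps.1, ps.2.1 ++ [rc], ps.2.2)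
  else if v = 3 then (ps.1, ps.2.1, ps.2.2 ++ [rc])
  else ps

def pvPos (grid : List (List Int)) (v : Int) : List (Nat × Nat) :=
  (pvCells grid.length (grid.getD 0 []).length).filter (fun rc => pvVal grid rc == v)

def pvColAll (m c : Nat) (o : List (List Int)) : List (List Int) :=
  (List.range m).foldl (fun o rr => pvSet2 o rr c 2) o

def pvRowAll (n r : Nat) (v : Int) (o : List (List Int)) : List (List Int) :=
  (List.range n).foldl (fun o cc => pvSet2 o r cc v) o

def pvRowFold (n : Nat) (v : Int) (row : List Int) : List Int :=
  (List.range n).foldl (fun row cc => row.set cc v) row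

theorem pvCellStep_fold (grid : List (List Int)) (L : List (Nat × Nat)) :
    ∀ (a b c : List (Nat × Nat)),
      L.foldl (pvCellStep grid) (a, b, c) =
        (a ++ L.filter (fun rc => pvVal grid rc == 1),
         b ++ L.filter (fun rc => pvVal grid rc == 2),
         c ++ L.filter (fun rc => pvVal grid rc == 3)) := by
  induction L with
  | nil => intro a b c; simp
  | cons rc rest ih =>
    intro a b c
    rw [List.foldl_cons]
    by_cases h1 : pvVal grid rc = 1
    · rw [show pvCellStep grid (a, b, c) rc = (a ++ [rc], b, c) from by simp [pvCellStep, h1], ih]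
      simp [List.filter_cons, h1]
    · by_cases h2 : pvVal grid rc = 2
      · rw [show pvCellStep grid (a, b, c) rc = (a, b ++ [rc], c) from by simp [pvCellStep, h1, h2], ih]
        simp [List.filter_cons, h1, h2]
      · by_cases h3 : pvVal grid rc = 3
        · rw [show pvCellStep grid (a, b, c) rc = (a, b, c ++ [rc]) from by simp [pvCellStep, h1, h2, h3], ih]
          simp [List.filter_cons, h1, h2, h3]
        · rw [show pvCellStep grid (a, b, c) rc = (a, b, c) from by simp [pvCellStep, h1, h2, h3], ih]
          simp [List.filter_cons, h1, h2, h3]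

theorem A_ps (grid : List (List Int)) :
    (List.range grid.length).foldl (fun ps r =>
        (List.range (grid.getD 0 []).length).foldl (fun ps c =>
          let v := (grid.getD r []).getD c 0
          if v = 1 then (ps.1 ++ [(r, c)], ps.2.1, ps.2.2)
          else if v = 2 then (ps.1, ps.2.1 ++ [(r, c)], ps.2.2)
          else if v = 3 then (ps.1, ps.2.1, ps.2.2 ++ [(r, c)])
          else ps) ps)
      (([], [], []) : List (Nat × Nat) × List (Nat × Nat) × List (Nat × Nat)) =
      (pvPos grid 1, pvPos grid 2, pvPos grid 3) := by
  have hnest : (pvCells grid.length (grid.getD 0 []).length).foldl (pvCellStep grid)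
      (([], [], []) : List (Nat × Nat) × List (Nat × Nat) × List (Nat × Nat)) =
      (List.range grid.length).foldl (fun ps r =>
        (List.range (grid.getD 0 []).length).foldl (fun ps c =>
          let v := (grid.getD r []).getD c 0
          if v = 1 then (ps.1 ++ [(r, c)], ps.2.1, ps.2.2)
          else if v = 2 then (ps.1, ps.2.1 ++ [(r, c)], ps.2.2)
          else if v = 3 then (ps.1, ps.2.1, ps.2.2 ++ [(r, c)])
          else ps) ps)
      (([], [], []) : List (Nat × Nat) × List (Nat × Nat) × List (Nat × Nat)) := by
    rw [pvCells, List.foldl_flatMap]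
    simp only [List.foldl_map]
    rfl
  rw [← hnest, pvCellStep_fold]
  simp [pvPos]

theorem mem_pvPos (grid : List (List Int)) (v : Int) (rc : Nat × Nat) :
    rc ∈ pvPos grid v ↔
      rc.1 < grid.length ∧ rc.2 < (grid.getD 0 []).length ∧ pvVal grid rc = v := by
  obtain ⟨r, c⟩ := rc
  simp only [pvPos, pvCells, List.mem_filter, List.mem_flatMap, List.mem_map, List.mem_range,
    beq_iff_eq, Prod.mk.injEq]
  constructor
  · rintro ⟨⟨a, ha, b, hb, hr, hc⟩, hv⟩
    subst hr; subst hc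
    exact ⟨ha, hb, hv⟩
  · rintro ⟨ha, hb, hv⟩
    exact ⟨⟨r, ha, c, hb, rfl, rfl⟩, hv⟩

theorem pos_any_row (grid : List (List Int)) (v : Int) (r : Nat) (hr : r < grid.length) :
    (pvPos grid v).any (fun rc => rc.1 == r) =
      pvHas (grid.getD r []) (grid.getD 0 []).length v := by
  rw [Bool.eq_iff_iff]
  simp only [List.any_eq_true, pvHas, beq_iff_eq, List.mem_range]
  constructor
  · rintro ⟨rc, hm, h⟩
    rw [mem_pvPos] at hm
    refine ⟨rc.2, hm.2.1, ?_⟩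
    rw [← h]
    simpa [pvVal] using hm.2.2
  · rintro ⟨c, hc, hv⟩
    exact ⟨(r, c), (mem_pvPos grid v (r, c)).mpr ⟨hr, hc, by simpa [pvVal] using hv⟩, rfl⟩

theorem pos_any_col (grid : List (List Int)) (c : Nat) (hc : c < (grid.getD 0 []).length) :
    (pvPos grid 2).any (fun rc => rc.2 == c) = pvCol2 grid c := by
  rw [Bool.eq_iff_iff]
  simp only [List.any_eq_true, pvCol2, beq_iff_eq]
  constructor
  · rintro ⟨rc, hm, h⟩
    rw [mem_pvPos] at hm
    refine ⟨grid.getD rc.1 [], ?_, ?_⟩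
    · rw [List.getD_eq_getElem?_getD, List.getElem?_eq_getElem hm.1]
      exact List.getElem_mem hm.1
    · rw [← h]
      simpa [pvVal] using hm.2.2
  · rintro ⟨row, hrow, hv⟩
    obtain ⟨i, hi, rfl⟩ := List.mem_iff_getElem.mp hrow
    refine ⟨(i, c), (mem_pvPos grid 2 (i, c)).mpr ⟨hi, hc, ?_⟩, rfl⟩
    simp only [pvVal]
    have hgd : grid.getD i [] = grid[i] := by
      rw [List.getD_eq_getElem?_getD, List.getElem?_eq_getElem hi, Option.getD_some]
    rw [hgd]
    exact hv

theorem pvSet2_len (o : List (List Int)) (r c : Nat) (v : Int) :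
    (pvSet2 o r c v).length = o.length := by simp [pvSet2]

theorem pv_foldl_len {α β : Type} (step : List β → α → List β)
    (h : ∀ s x, (step s x).length = s.length) :
    ∀ (L : List α) (s : List β), (L.foldl step s).length = s.length := by
  intro L
  induction L with
  | nil => intro s; rfl
  | cons x L ih => intro s; rw [List.foldl_cons, ih, h]

theorem pvColAll_len (m c : Nat) (o : List (List Int)) : (pvColAll m c o).length = o.length :=
  pv_foldl_len _ (fun s x => pvSet2_len s x c 2) _ o

theorem pvRowAll_len (n r : Nat) (v : Int) (o : List (List Int)) :
    (pvRowAll n r v o).length = o.length :=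
  pv_foldl_len _ (fun s x => pvSet2_len s r x v) _ o

theorem pvRowFold_len (n : Nat) (v : Int) (row : List Int) :
    (pvRowFold n v row).length = row.length :=
  pv_foldl_len _ (fun s x => List.length_set) _ row

theorem pvColAll_succ (m c : Nat) (o : List (List Int)) :
    pvColAll (m + 1) c o = pvSet2 (pvColAll m c o) m c 2 := by
  simp [pvColAll, List.range_succ]

theorem pvColAll_get (c : Nat) (o : List (List Int)) :
    ∀ (m r : Nat), (pvColAll m c o)[r]? =
      if r < m then o[r]?.map (fun row => row.set c (2 : Int)) else o[r]? := by
  intro m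
  induction m with
  | zero => intro r; simp [pvColAll]
  | succ m ih =>
    intro r
    rw [pvColAll_succ, pvSet2, List.getElem?_set]
    by_cases hrm : m = r
    · subst hrm
      rw [pvColAll_len]
      by_cases hlt : m < o.length
      · rw [if_pos rfl, if_pos hlt, if_pos (by omega)]
        rw [List.getD_eq_getElem?_getD, ih, if_neg (by omega), List.getElem?_eq_getElem hlt]
        simp
      · rw [if_pos rfl, if_neg hlt, if_pos (by omega), List.getElem?_eq_none (by omega)]
        simp
    · rw [if_neg hrm, ih]
      by_cases hr : r < m
      · rw [if_pos hr, if_pos (by omega)]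
      · rw [if_neg hr, if_neg (by omega)]

theorem pvRowFold_succ (n : Nat) (v : Int) (row : List Int) :
    pvRowFold (n + 1) v row = (pvRowFold n v row).set n v := by
  simp [pvRowFold, List.range_succ]

theorem pvRowFold_get (v : Int) (row : List Int) :
    ∀ (n c : Nat), (pvRowFold n v row)[c]? =
      if c < n then row[c]?.map (fun _ => v) else row[c]? := by
  intro n
  induction n with
  | zero => intro c; simp [pvRowFold]
  | succ n ih =>
    intro c
    rw [pvRowFold_succ, List.getElem?_set]
    by_cases hnc : n = c
    · subst hnc
      rw [pvRowFold_len]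
      by_cases hlt : n < row.length
      · rw [if_pos rfl, if_pos hlt, if_pos (by omega), List.getElem?_eq_getElem hlt]
        simp
      · rw [if_pos rfl, if_neg hlt, if_pos (by omega), List.getElem?_eq_none (by omega)]
        simp
    · rw [if_neg hnc, ih]
      by_cases hcn : c < n
      · rw [if_pos hcn, if_pos (by omega)]
      · rw [if_neg hcn, if_neg (by omega)]

theorem pvRowFold_replicate (n : Nat) (v : Int) (row : List Int) (h : row.length = n) :
    pvRowFold n v row = List.replicate n v := by
  apply List.ext_getElem?
  intro c
  rw [pvRowFold_get, List.getElem?_replicate]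
  by_cases hc : c < n
  · rw [if_pos hc, if_pos hc, List.getElem?_eq_getElem (by omega)]
    simp
  · rw [if_neg hc, if_neg hc, List.getElem?_eq_none (by omega)]

theorem pvRowAll_succ (n r : Nat) (v : Int) (o : List (List Int)) :
    pvRowAll (n + 1) r v o = pvSet2 (pvRowAll n r v o) r n v := by
  simp [pvRowAll, List.range_succ]

theorem pvRowAll_get (r : Nat) (v : Int) (o : List (List Int)) :
    ∀ (n i : Nat), (pvRowAll n r v o)[i]? =
      if i = r then o[i]?.map (pvRowFold n v) else o[i]? := by
  intro n
  induction n with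
  | zero =>
    intro i
    by_cases h : i = r
    · rw [if_pos h]
      cases ho : o[i]? <;> simp [pvRowAll, pvRowFold, ho]
    · rw [if_neg h]; simp [pvRowAll]
  | succ n ih =>
    intro i
    rw [pvRowAll_succ, pvSet2, List.getElem?_set]
    by_cases h : r = i
    · subst h
      rw [pvRowAll_len, if_pos rfl, if_pos rfl]
      by_cases hlt : r < o.length
      · rw [if_pos hlt, List.getD_eq_getElem?_getD, ih, if_pos rfl,
          List.getElem?_eq_getElem hlt]
        simp [pvRowFold_succ]
      · rw [if_neg hlt, List.getElem?_eq_none (by omega)]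
        simp
    · rw [if_neg h, ih, if_neg (fun hh => h hh.symm), if_neg (fun hh => h hh.symm)]

theorem pvColStage_get (m : Nat) (p : List (Nat × Nat)) :
    ∀ (o : List (List Int)), o.length = m → ∀ (r : Nat),
      (p.foldl (fun o rc => pvColAll m rc.2 o) o)[r]? =
        o[r]?.map (fun row => p.foldl (fun row rc => row.set rc.2 (2 : Int)) row) := by
  induction p with
  | nil => intro o h r; cases ho : o[r]? <;> simp [ho]
  | cons rc rest ih =>
    intro o h r
    rw [List.foldl_cons]
    have hlen : (pvColAll m rc.2 o).length = m := by rw [pvColAll_len, h]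
    rw [ih _ hlen r, pvColAll_get]
    by_cases hr : r < m
    · rw [if_pos hr]
      cases ho : o[r]? <;> simp [ho]
    · rw [if_neg hr]
      have hnone : o[r]? = none := List.getElem?_eq_none (by omega)
      simp [hnone]

theorem pvSetsFold_get (p : List (Nat × Nat)) :
    ∀ (row : List Int) (c : Nat), (∀ rc ∈ p, rc.2 < row.length) →
      (p.foldl (fun row rc => row.set rc.2 (2 : Int)) row)[c]? =
        if p.any (fun rc => rc.2 == c) then some 2 else row[c]? := by
  induction p with
  | nil => intro row c _; simp
  | cons rc rest ih =>
    intro row c hb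
    rw [List.foldl_cons,
      ih _ c (fun x hx => by rw [List.length_set]; exact hb x (List.mem_cons_of_mem _ hx)),
      List.any_cons]
    by_cases hrest : rest.any (fun rc => rc.2 == c) = true
    · rw [if_pos hrest, if_pos (by simp [hrest])]
    · rw [if_neg hrest, List.getElem?_set]
      have hlt : rc.2 < row.length := hb rc List.mem_cons_self
      by_cases he : rc.2 = c
      · subst he
        rw [if_pos rfl, if_pos hlt, if_pos (by simp)]
      · have hcond : ¬ (((rc.2 == c) || (rest.any fun rc => rc.2 == c)) = true) := by
          simp [he, hrest]
        rw [if_neg he, if_neg hcond]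

theorem pvRowStage_get (n : Nat) (v : Int) (p : List (Nat × Nat)) :
    ∀ (o : List (List Int)), (∀ (i : Nat) (row : List Int), o[i]? = some row → row.length = n) → ∀ (r : Nat),
      (p.foldl (fun o rc => pvRowAll n rc.1 v o) o)[r]? =
        if p.any (fun rc => rc.1 == r) then o[r]?.map (fun _ => List.replicate n v)
        else o[r]? := by
  induction p with
  | nil => intro o _ r; simp
  | cons rc rest ih =>
    intro o h r
    rw [List.foldl_cons]
    have h' : ∀ (i : Nat) (row : List Int), (pvRowAll n rc.1 v o)[i]? = some row → row.length = n := by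
      intro i row hi
      rw [pvRowAll_get] at hi
      by_cases hir : i = rc.1
      · rw [if_pos hir] at hi
        cases hoi : o[i]? with
        | none => rw [hoi] at hi; simp at hi
        | some row0 =>
          rw [hoi] at hi
          simp only [Option.map_some, Option.some.injEq] at hi
          rw [← hi, pvRowFold_len]
          exact h _ _ hoi
      · rw [if_neg hir] at hi
        exact h _ _ hi
    rw [ih _ h' r, List.any_cons]
    by_cases hrest : rest.any (fun rc => rc.1 == r) = true
    · rw [if_pos hrest, if_pos (by simp [hrest]), pvRowAll_get]
      by_cases hr : r = rc.1
      · rw [if_pos hr]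
        cases ho : o[r]? <;> simp [ho]
      · rw [if_neg hr]
    · rw [if_neg hrest, pvRowAll_get]
      by_cases hr : rc.1 = r
      · rw [if_pos hr.symm, if_pos (by simp [hr])]
        cases hor : o[r]? with
        | none => simp
        | some row0 =>
          simp only [Option.map_some, Option.some.injEq]
          exact pvRowFold_replicate n v row0 (h _ _ hor)
      · rw [if_neg (fun hh => hr hh.symm), if_neg (by simp [hr, hrest])]

theorem A_restate (grid : List (List Int)) :
    solve_178fcbfb grid =
      (pvPos grid 1).foldl (fun o rc => pvRowAll (grid.getD 0 []).length rc.1 1 o)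
        ((pvPos grid 3).foldl (fun o rc => pvRowAll (grid.getD 0 []).length rc.1 3 o)
          ((pvPos grid 2).foldl (fun o rc => pvColAll grid.length rc.2 o)
            ((List.range grid.length).map (fun _ => List.replicate (grid.getD 0 []).length (0 : Int))))) := by
  unfold solve_178fcbfb
  simp only [A_ps]
  rfl

theorem A_eq_pvSpecGrid (grid : List (List Int)) :
    solve_178fcbfb grid = pvSpecGrid grid := by
  rw [A_restate]
  have hout0 : ∀ r : Nat,
      ((List.range grid.length).map (fun _ => List.replicate (grid.getD 0 []).length (0 : Int)))[r]? =
        if r < grid.length then some (List.replicate (grid.getD 0 []).length (0 : Int)) else none := by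
    intro r
    rw [List.getElem?_map]
    by_cases hr : r < grid.length
    · rw [List.getElem?_range hr, if_pos hr, Option.map_some]
    · rw [List.getElem?_eq_none (by simpa using hr), if_neg hr, Option.map_none]
  have hsets : (pvPos grid 2).foldl (fun row rc => row.set rc.2 (2 : Int))
      (List.replicate (grid.getD 0 []).length (0 : Int)) =
      (List.range (grid.getD 0 []).length).map (fun c => if pvCol2 grid c then (2 : Int) else 0) := by
    apply List.ext_getElem?
    intro c
    rw [pvSetsFold_get _ _ _ (by
      intro rc hm
      rw [List.length_replicate]
      exact ((mem_pvPos grid 2 rc).mp hm).2.1), List.getElem?_map]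
    by_cases hc : c < (grid.getD 0 []).length
    · rw [pos_any_col grid c hc, List.getElem?_range hc, Option.map_some, List.getElem?_replicate, if_pos hc]
      by_cases h2 : pvCol2 grid c = true
      · rw [if_pos h2]; simp [h2]
      · rw [if_neg h2]; simp [h2]
    · have hany : ((pvPos grid 2).any (fun rc => rc.2 == c)) = false := by
        rw [List.any_eq_false]
        intro rc hm
        simp only [beq_iff_eq]
        exact fun he => hc (he ▸ ((mem_pvPos grid 2 rc).mp hm).2.1)
      rw [hany, List.getElem?_eq_none (by simpa using hc),
        List.getElem?_eq_none (by rw [List.length_range]; omega)]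
      simp
  have hout1 : ∀ r : Nat,
      ((pvPos grid 2).foldl (fun o rc => pvColAll grid.length rc.2 o)
        ((List.range grid.length).map (fun _ => List.replicate (grid.getD 0 []).length (0 : Int))))[r]? =
      if r < grid.length then
        some ((List.range (grid.getD 0 []).length).map (fun c => if pvCol2 grid c then (2 : Int) else 0))
      else none := by
    intro r
    rw [pvColStage_get grid.length (pvPos grid 2) _ (by simp) r, hout0 r]
    by_cases hr : r < grid.length
    · rw [if_pos hr, if_pos hr, Option.map_some, hsets]
    · rw [if_neg hr, if_neg hr, Option.map_none]
  have hlen1 : ∀ (i : Nat) (row : List Int),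
      ((pvPos grid 2).foldl (fun o rc => pvColAll grid.length rc.2 o)
        ((List.range grid.length).map (fun _ => List.replicate (grid.getD 0 []).length (0 : Int))))[i]? = some row →
      row.length = (grid.getD 0 []).length := by
    intro i row hi
    rw [hout1 i] at hi
    by_cases hr : i < grid.length
    · rw [if_pos hr] at hi
      simp only [Option.some.injEq] at hi
      rw [← hi]; simp
    · rw [if_neg hr] at hi; simp at hi
  have hout2 : ∀ r : Nat,
      ((pvPos grid 3).foldl (fun o rc => pvRowAll (grid.getD 0 []).length rc.1 3 o)
        ((pvPos grid 2).foldl (fun o rc => pvColAll grid.length rc.2 o)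
          ((List.range grid.length).map (fun _ => List.replicate (grid.getD 0 []).length (0 : Int)))))[r]? =
      if r < grid.length then
        some (if pvHas (grid.getD r []) (grid.getD 0 []).length 3 then List.replicate (grid.getD 0 []).length (3 : Int)
          else (List.range (grid.getD 0 []).length).map (fun c => if pvCol2 grid c then (2 : Int) else 0))
      else none := by
    intro r
    rw [pvRowStage_get _ _ _ _ hlen1 r, hout1 r]
    by_cases hr : r < grid.length
    · rw [pos_any_row grid 3 r hr, if_pos hr, if_pos hr]
      by_cases h3 : pvHas (grid.getD r []) (grid.getD 0 []).length 3 = true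
      · rw [if_pos h3, if_pos h3, Option.map_some]
      · rw [if_neg h3, if_neg h3]
    · rw [if_neg hr, if_neg hr]
      split_ifs <;> simp
  have hlen2 : ∀ (i : Nat) (row : List Int),
      ((pvPos grid 3).foldl (fun o rc => pvRowAll (grid.getD 0 []).length rc.1 3 o)
        ((pvPos grid 2).foldl (fun o rc => pvColAll grid.length rc.2 o)
          ((List.range grid.length).map (fun _ => List.replicate (grid.getD 0 []).length (0 : Int)))))[i]? = some row →
      row.length = (grid.getD 0 []).length := by
    intro i row hi
    rw [hout2 i] at hi
    by_cases hr : i < grid.length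
    · rw [if_pos hr] at hi
      simp only [Option.some.injEq] at hi
      rw [← hi]
      split_ifs <;> simp
    · rw [if_neg hr] at hi; simp at hi
  apply List.ext_getElem?
  intro r
  rw [pvRowStage_get _ _ _ _ hlen2 r]
  have hspec : (pvSpecGrid grid)[r]? =
      if r < grid.length then
        some (if pvHas (grid.getD r []) (grid.getD 0 []).length 1 then List.replicate (grid.getD 0 []).length (1 : Int)
          else if pvHas (grid.getD r []) (grid.getD 0 []).length 3 then List.replicate (grid.getD 0 []).length (3 : Int)
          else (List.range (grid.getD 0 []).length).map (fun c => if pvCol2 grid c then (2 : Int) else 0))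
      else none := by
    rw [pvSpecGrid, List.getElem?_map]
    by_cases hr : r < grid.length
    · rw [List.getElem?_range hr, if_pos hr, Option.map_some]
    · rw [List.getElem?_eq_none (by simpa using hr), if_neg hr, Option.map_none]
  rw [hspec, hout2 r]
  by_cases hr : r < grid.length
  · rw [pos_any_row grid 1 r hr, if_pos hr, if_pos hr]
    by_cases h1 : pvHas (grid.getD r []) (grid.getD 0 []).length 1 = true
    · rw [if_pos h1, if_pos h1, Option.map_some]
    · rw [if_neg h1, if_neg h1]
  · rw [if_neg hr, if_neg hr]
    split_ifs <;> simp

-- ===== VERDICT (by name: the statement is the Claim_ definition above) =====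
theorem solve_178fcbfb_spec : Claim_equal_solve_178fcbfb := by
  intro grid _ _
  unfold Spec_solve_178fcbfb
  rw [A_eq_pvSpecGrid, B_eq_pvSpecGrid]
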